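-- pv_equiv track=rewrite | github.com/wsxwj123/opencode-skills-backup | skills/nsfc-proposal/scripts/consistency_mapper.py | _v02
-- ===== SOURCE A (Python) =====
-- from typing import Any
--
-- def _ids(items: list[dict[str, Any]]) -> set[str]:
--     return {x.get("id") for x in items if x.get("id")}
--
-- def _v02(cm: dict[str, Any]) -> bool:
--     hs = cm.get("hypotheses", [])
--     os = cm.get("objectives", [])
--     rs = cm.get("research_contents", [])
--     ks = cm.get("key_scientific_problems", [])
--     if not (len(hs) == len(os) == len(rs) == len(ks)):
--         return False
--
--     o_ids = _ids(os)
--     r_ids = _ids(rs)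
--     k_ids = _ids(ks)
--     for h in hs:
--         if h.get("mapped_to_objective") not in o_ids:
--             return False
--         if h.get("mapped_to_rc") not in r_ids:
--             return False
--         if h.get("mapped_to_ksq") not in k_ids:
--             return False
--     return True
-- ===== SOURCE B (Python) =====
-- from typing import Any
--
--
-- def _v02(cm: dict[str, Any]) -> bool:
--     hs = cm.get("hypotheses", [])
--     os = cm.get("objectives", [])
--     rs = cm.get("research_contents", [])
--     ks = cm.get("key_scientific_problems", [])
--     if not (len(hs) == len(os) == len(rs) == len(ks)):
--         return False
--     # Sort-and-merge subset check per field: no hash sets; sorted mapped values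
--     # are merged against the sorted reference ids with one advancing pointer.
--     for key, ref in (("mapped_to_objective", os),
--                      ("mapped_to_rc", rs),
--                      ("mapped_to_ksq", ks)):
--         vals = []
--         for h in hs:
--             v = h.get(key)
--             if v is None:
--                 return False
--             vals.append(v)
--         vals.sort()
--         ids = sorted(x.get("id") for x in ref if x.get("id"))
--         i = 0
--         for v in vals:
--             while i < len(ids) and ids[i] < v:
--                 i += 1
--             if i == len(ids) or ids[i] != v:
--                 return False
--     return True
-- ===== Notes on version B (the rewrite author's own statement) =====
-- stated objective: alternative
-- what changed: Replaces A's hash-set membership loop by a sort-and-merge subset check: per field, the mapped values and the reference ids are sorted and compared with a single advancing-pointer merge scan, with no sets built at all.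
import Mathlib
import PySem

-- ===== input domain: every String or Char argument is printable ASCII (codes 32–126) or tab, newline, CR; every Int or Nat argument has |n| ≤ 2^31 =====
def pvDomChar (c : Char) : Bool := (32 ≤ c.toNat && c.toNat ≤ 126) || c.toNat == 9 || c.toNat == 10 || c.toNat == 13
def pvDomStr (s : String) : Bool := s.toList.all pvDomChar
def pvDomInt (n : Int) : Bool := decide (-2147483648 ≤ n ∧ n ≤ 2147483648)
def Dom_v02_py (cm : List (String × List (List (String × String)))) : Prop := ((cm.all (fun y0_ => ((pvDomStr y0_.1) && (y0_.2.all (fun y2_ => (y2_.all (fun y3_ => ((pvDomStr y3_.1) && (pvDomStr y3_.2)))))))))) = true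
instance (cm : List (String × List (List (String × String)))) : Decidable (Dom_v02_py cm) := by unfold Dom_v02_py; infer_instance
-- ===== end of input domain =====

-- B replaces A's hash-set membership loop by a per-field sort-and-merge subset check (objective: alternative).

-- ===== PORT A =====
-- {x.get("id") for x in items if x.get("id")}  (set of the truthy ids, in iteration order)
def pvIds (items : List (List (String × String))) : PySem.Set String :=
  PySem.Set.ofList (items.filterMap (fun x =>
    match (PySem.Dict.mk x).get? "id" with
    | some s => if s ≠ "" then some s else none
    | none => none))

-- 'o in s' where o is an Optional value and s a set of strings (None is never a member)
def pvOptIn (o : Option String) (s : PySem.Set String) : Bool :=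
  match o with
  | some v => PySem.Set.contains s v
  | none => false

-- the 'for h in hs' loop with its three early returns
def pvLoopA (oIds rIds kIds : PySem.Set String) : List (List (String × String)) → Bool
  | [] => true
  | h :: t =>
    if !(pvOptIn ((PySem.Dict.mk h).get? "mapped_to_objective") oIds) then false
    else if !(pvOptIn ((PySem.Dict.mk h).get? "mapped_to_rc") rIds) then false
    else if !(pvOptIn ((PySem.Dict.mk h).get? "mapped_to_ksq") kIds) then false
    else pvLoopA oIds rIds kIds t

def v02_py (cm : List (String × List (List (String × String)))) : Bool :=
  let d := PySem.Dict.mk cm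
  let hs := d.getD "hypotheses" []
  let os := d.getD "objectives" []
  let rs := d.getD "research_contents" []
  let ks := d.getD "key_scientific_problems" []
  if !(hs.length == os.length && os.length == rs.length && rs.length == ks.length) then false
  else pvLoopA (pvIds os) (pvIds rs) (pvIds ks) hs

-- ===== PORT B =====
-- the list comprehension 'x.get("id") for x in ref if x.get("id")' (a LIST, duplicates kept)
def pvIdList (items : List (List (String × String))) : List String :=
  items.filterMap (fun x =>
    match (PySem.Dict.mk x).get? "id" with
    | some s => if s ≠ "" then some s else none
    | none => none)

-- the 'for h in hs' collection loop: none = the early 'return False' on a missing key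
def pvVals? (key : String) : List (List (String × String)) → Option (List String)
  | [] => some []
  | h :: t =>
    match (PySem.Dict.mk h).get? key with
    | none => none
    | some v => (pvVals? key t).map (v :: ·)

-- the merge scan: 'while i < len(ids) and ids[i] < v: i += 1' is the dropWhile; the pointer is the remaining suffix
def pvMerge : List String → List String → Bool
  | [], _ => true
  | v :: vs, ids =>
    match ids.dropWhile (fun w => decide (w < v)) with
    | [] => false
    | i :: rest => if i = v then pvMerge vs (i :: rest) else false

-- one iteration of the 'for key, ref in (…)' loop body
def pvFieldOk (hs : List (List (String × String))) (key : String)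
    (ref : List (List (String × String))) : Bool :=
  match pvVals? key hs with
  | none => false
  | some vals =>
    pvMerge (PySem.List.sorted vals (fun x => x) false)
      (PySem.List.sorted (pvIdList ref) (fun x => x) false)

def v02_py_alt (cm : List (String × List (List (String × String)))) : Bool :=
  let d := PySem.Dict.mk cm
  let hs := d.getD "hypotheses" []
  let os := d.getD "objectives" []
  let rs := d.getD "research_contents" []
  let ks := d.getD "key_scientific_problems" []
  if !(hs.length == os.length && os.length == rs.length && rs.length == ks.length) then false
  else
    pvFieldOk hs "mapped_to_objective" os
      && pvFieldOk hs "mapped_to_rc" rs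
      && pvFieldOk hs "mapped_to_ksq" ks

-- ===== PRECONDITION & SPEC =====
def Spec_v02_py (cm : List (String × List (List (String × String)))) (out : Bool) : Prop := out = v02_py_alt cm
instance (cm : List (String × List (List (String × String)))) (out : Bool) : Decidable (Spec_v02_py cm out) := by unfold Spec_v02_py; infer_instance

-- ===== CLAIM (what is proved, stated in full; the proofs are below) =====
def Claim_equal_v02_py : Prop := ∀ (cm : List (String × List (List (String × String)))), Dom_v02_py cm → Spec_v02_py cm (v02_py cm)

-- ===== LEMMAS AND PROOFS =====

-- pointwise-equal predicates give equal List.all (specific congruence used twice below)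
theorem pvAllCongr {α : Type} (l : List α) (p q : α → Bool) (h : ∀ x ∈ l, p x = q x) :
    l.all p = l.all q := by
  induction l with
  | nil => rfl
  | cons x t ih =>
    simp only [List.all_cons, h x List.mem_cons_self,
      ih (fun y hy => h y (List.mem_cons_of_mem _ hy))]

-- A's early-return loop is the conjunction of the three membership tests over all hypotheses
theorem pvLoopA_eq_all (oIds rIds kIds : PySem.Set String)
    (hs : List (List (String × String))) :
    pvLoopA oIds rIds kIds hs
      = hs.all (fun h =>
          pvOptIn ((PySem.Dict.mk h).get? "mapped_to_objective") oIds
            && pvOptIn ((PySem.Dict.mk h).get? "mapped_to_rc") rIds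
            && pvOptIn ((PySem.Dict.mk h).get? "mapped_to_ksq") kIds) := by
  induction hs with
  | nil => rfl
  | cons h t ih =>
    simp only [pvLoopA, List.all_cons, ih]
    by_cases h1 : pvOptIn ((PySem.Dict.mk h).get? "mapped_to_objective") oIds <;>
      by_cases h2 : pvOptIn ((PySem.Dict.mk h).get? "mapped_to_rc") rIds <;>
        by_cases h3 : pvOptIn ((PySem.Dict.mk h).get? "mapped_to_ksq") kIds <;>
          simp [h1, h2, h3]

-- merge scan over two ≤-sorted lists decides the subset relation
theorem pvMerge_eq_all (vals ids : List String)
    (hv : vals.Pairwise (· ≤ ·)) (hi : ids.Pairwise (· ≤ ·)) :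
    pvMerge vals ids = vals.all (fun v => decide (v ∈ ids)) := by
  induction vals generalizing ids with
  | nil => rfl
  | cons v vs ih =>
    obtain ⟨hvle, hvp⟩ := List.pairwise_cons.1 hv
    have hsplit : ids = ids.takeWhile (fun w => decide (w < v)) ++
        ids.dropWhile (fun w => decide (w < v)) := (List.takeWhile_append_dropWhile).symm
    have htake : ∀ w ∈ ids.takeWhile (fun w => decide (w < v)), w < v := by
      intro w hw; simpa using List.mem_takeWhile_imp hw
    have hmem : ∀ w, v ≤ w →
        (w ∈ ids ↔ w ∈ ids.dropWhile (fun u => decide (u < v))) := by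
      intro w hw
      constructor
      · intro hmw
        rw [hsplit] at hmw
        rcases List.mem_append.1 hmw with h' | h'
        · exact absurd (htake w h') (not_lt.2 hw)
        · exact h'
      · intro h'; rw [hsplit]; exact List.mem_append.2 (Or.inr h')
    have hdp : (ids.dropWhile (fun u => decide (u < v))).Pairwise (· ≤ ·) :=
      List.Pairwise.sublist (List.dropWhile_sublist _) hi
    simp only [pvMerge, List.all_cons]
    cases hcase : ids.dropWhile (fun w => decide (w < v)) with
    | nil =>
      have : v ∉ ids := by
        intro hvm
        have := (hmem v le_rfl).1 hvm
        rw [hcase] at this; exact List.not_mem_nil this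
      simp [this]
    | cons i rest =>
      have hvi : v ≤ i := by
        have := List.head_dropWhile_not (fun w => decide (w < v)) (l := ids)
        rw [hcase] at this
        simpa using this (by simp)
      rw [hcase] at hdp hmem
      by_cases hiv : i = v
      · subst hiv
        have hivm : i ∈ ids := (hmem i le_rfl).2 (List.mem_cons_self)
        have hall : vs.all (fun w => decide (w ∈ ids))
            = vs.all (fun w => decide (w ∈ i :: rest)) := by
          apply pvAllCongr
          intro w hw
          simp only [decide_eq_decide]
          exact hmem w (hvle w hw)
        simp [hivm, ih (i :: rest) hvp hdp, hall]
      · have hvlt : v < i := lt_of_le_of_ne hvi (fun h => hiv h.symm)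
        have hnv : v ∉ ids := by
          intro hvm
          rcases (hmem v le_rfl).1 hvm with h' 
          rcases List.mem_cons.1 h' with h'' | h''
          · exact hiv h''.symm
          · obtain ⟨hp, _⟩ := List.pairwise_cons.1 hdp
            exact absurd (hp v h'') (not_le.2 hvlt)
        simp [hiv, hnv]

-- B's field check is the membership-in-the-id-list test over all hypotheses
theorem pvFieldOk_eq_all (hs : List (List (String × String))) (key : String)
    (ref : List (List (String × String))) :
    pvFieldOk hs key ref
      = hs.all (fun h =>
          match (PySem.Dict.mk h).get? key with
          | none => false
          | some v => decide (v ∈ pvIdList ref)) := by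
  unfold pvFieldOk
  have hmerge :
      ∀ vals : List String,
        pvMerge (PySem.List.sorted vals (fun x => x) false)
            (PySem.List.sorted (pvIdList ref) (fun x => x) false)
          = vals.all (fun v => decide (v ∈ pvIdList ref)) := by
    intro vals
    rw [pvMerge_eq_all _ _ (PySem.List.sorted_pairwise vals (fun x => x))
        (PySem.List.sorted_pairwise (pvIdList ref) (fun x => x))]
    rw [(PySem.List.sorted_perm vals (fun x => x) false).all_eq]
    apply pvAllCongr
    intro w _
    simp [PySem.List.mem_sorted]
  induction hs with
  | nil => simp [pvVals?, hmerge []]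
  | cons h t ih =>
    simp only [pvVals?, List.all_cons]
    cases hg : (PySem.Dict.mk h).get? key with
    | none => simp
    | some v =>
      cases hv : pvVals? key t with
      | none =>
        rw [hv] at ih
        simp only [Option.map_none]
        simp [← ih]
      | some vals =>
        rw [hv] at ih
        simp only [hmerge] at ih
        simp only [Option.map_some, hmerge, List.all_cons]
        rw [ih]

-- membership in A's id set coincides with membership in B's id list
theorem pvOptIn_eq_mem (o : Option String) (ref : List (List (String × String))) :
    pvOptIn o (pvIds ref)
      = match o with
        | none => false
        | some v => decide (v ∈ pvIdList ref) := by
  cases o with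
  | none => rfl
  | some v =>
    simp only [pvOptIn, pvIds, pvIdList]
    rw [Bool.eq_iff_iff]
    simp [PySem.Set.mem_ofList]

-- Bool.all distributes over a threefold conjunction
theorem pvAllAnd3 {α : Type} (l : List α) (p q r : α → Bool) :
    l.all (fun x => p x && q x && r x) = (l.all p && l.all q && l.all r) := by
  induction l with
  | nil => rfl
  | cons x t ih =>
    simp only [List.all_cons, ih]
    by_cases h1 : p x <;> by_cases h2 : q x <;> by_cases h3 : r x <;> simp [h1, h2, h3]

-- ===== VERDICT (by name: the statement is the Claim_ definition above) =====
theorem v02_py_spec : Claim_equal_v02_py := by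
  intro cm _
  unfold Spec_v02_py v02_py v02_py_alt
  simp only [pvLoopA_eq_all, pvFieldOk_eq_all, ← pvOptIn_eq_mem, pvAllAnd3]
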